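-- pv_equiv track=rewrite | github.com/kipple99/Algorithm | min_fee.py | min_fee
-- ===== SOURCE A (Python) =====
-- def min_fee(pages_to_print):
--     # 여기에 코드를 작성하세요
--     fee = 0
--     min_list = []
--
--     for i in sorted(pages_to_print):
--         fee += i
--         min_list.append(fee)
--
--     min_sum = 0
--
--     for j in min_list:
--         min_sum += j
--
--     return min_sum
-- ===== SOURCE B (Python) =====
-- def min_fee(pages_to_print):
--     n = len(pages_to_print)
--     return sum((n - idx) * val for idx, val in enumerate(sorted(pages_to_print)))
-- ===== Notes on version B (the rewrite author's own statement) =====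
-- stated objective: simpler
-- what changed: Replaces the two loops (building the prefix-sum list, then summing it) with one weighted pass: each sorted element at index idx contributes (n-idx)*val directly, so no prefix-sum list or running fee accumulator is kept.
import Mathlib
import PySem

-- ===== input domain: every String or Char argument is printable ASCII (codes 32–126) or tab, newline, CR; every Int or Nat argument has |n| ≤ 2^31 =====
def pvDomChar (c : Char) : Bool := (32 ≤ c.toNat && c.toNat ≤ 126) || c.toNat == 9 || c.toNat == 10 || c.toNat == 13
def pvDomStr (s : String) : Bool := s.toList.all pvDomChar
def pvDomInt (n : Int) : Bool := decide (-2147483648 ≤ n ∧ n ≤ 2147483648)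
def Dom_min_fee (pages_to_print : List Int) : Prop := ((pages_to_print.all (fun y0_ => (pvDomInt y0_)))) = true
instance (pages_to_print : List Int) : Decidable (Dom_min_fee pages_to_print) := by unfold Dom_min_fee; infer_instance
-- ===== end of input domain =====

-- ===== PORT A =====
-- Port of A: sort, accumulate prefix sums into min_list, then sum min_list.
def min_fee (pages_to_print : List Int) : Int :=
  let st := (PySem.List.sorted pages_to_print (fun x => x) false).foldl
      (fun (st : Int × List Int) i => (st.1 + i, st.2 ++ [st.1 + i])) ((0 : Int), ([] : List Int))
  st.2.foldl (fun min_sum j => min_sum + j) 0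

-- ===== PORT B =====
-- Port of B: single weighted pass over the sorted list, (n - idx) * val per element.
def min_fee_alt (pages_to_print : List Int) : Int :=
  let n : Int := pages_to_print.length
  ((PySem.List.enumerate (PySem.List.sorted pages_to_print (fun x => x) false) 0).map
    (fun p => (n - p.1) * p.2)).sum

-- ===== PRECONDITION & SPEC =====
def Spec_min_fee (pages_to_print : List Int) (out : Int) : Prop := out = min_fee_alt pages_to_print
instance (pages_to_print : List Int) (out : Int) : Decidable (Spec_min_fee pages_to_print out) := by unfold Spec_min_fee; infer_instance

-- ===== CLAIM (what is proved, stated in full; the proofs are below) =====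
def Claim_equal_min_fee : Prop := ∀ (pages_to_print : List Int), Dom_min_fee pages_to_print → Spec_min_fee pages_to_print (min_fee pages_to_print)

-- ===== LEMMAS AND PROOFS =====

-- ===== VERDICT (by name: the statement is the Claim_ definition above) =====
-- prefix-sum list produced by A's first loop, starting from accumulator f
def prefixes (f : Int) : List Int → List Int
  | [] => []
  | x :: xs => (f + x) :: prefixes (f + x) xs

theorem foldl_prefixes (l : List Int) : ∀ (f : Int) (acc : List Int),
    l.foldl (fun (st : Int × List Int) i => (st.1 + i, st.2 ++ [st.1 + i])) (f, acc)
      = (f + l.sum, acc ++ prefixes f l) := by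
  induction l with
  | nil => intro f acc; simp [prefixes]
  | cons x xs ih =>
      intro f acc
      simp only [List.foldl_cons, prefixes, ih, List.append_assoc, List.sum_cons,
        List.cons_append, List.nil_append, Prod.mk.injEq, and_true]
      ring

theorem foldl_add_eq_sum (l : List Int) : ∀ a : Int,
    l.foldl (fun x j => x + j) a = a + l.sum := by
  induction l with
  | nil => intro a; simp
  | cons x xs ih => intro a; simp only [List.foldl_cons, List.sum_cons, ih (a + x)]; ring

theorem sum_prefixes_shift (l : List Int) : ∀ f : Int,
    (prefixes f l).sum = l.length * f + (prefixes 0 l).sum := by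
  induction l with
  | nil => intro f; simp [prefixes]
  | cons x xs ih =>
      intro f
      simp only [prefixes, List.sum_cons, List.length_cons, zero_add]
      rw [ih (f + x), ih x]
      push_cast
      ring

theorem weighted_sum_gen (l : List Int) : ∀ (s n : Int),
    ((PySem.List.enumerate l s).map (fun p => (n - p.1) * p.2)).sum
      = (prefixes 0 l).sum + (n - s - l.length) * l.sum := by
  induction l with
  | nil => intro s n; simp [prefixes]
  | cons x xs ih =>
      intro s n
      rw [PySem.List.enumerate_cons]
      simp only [List.map_cons, List.sum_cons, ih (s + 1) n, prefixes, List.sum_cons,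
        List.length_cons, zero_add]
      rw [sum_prefixes_shift xs x]
      push_cast
      ring

-- ===== VERDICT-support =====
theorem min_fee_spec : Claim_equal_min_fee := by
  intro ps _
  unfold Spec_min_fee min_fee min_fee_alt
  rw [foldl_prefixes]
  simp only [List.nil_append]
  rw [foldl_add_eq_sum, weighted_sum_gen]
  rw [PySem.List.length_sorted]
  ring
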